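-- pv_equiv track=rewrite | github.com/adibudaraju/FOL-Visualizer | app.py | unicodify
-- ===== SOURCE A (Python) =====
-- def unicodify(arr):
--     arr_new = []
--     for a in arr:
--         b = a.replace("forall", chr(0x2200))
--         b = b.replace("exists", chr(0x2203))
--         b = b.replace("||", chr(0x2228))
--         b = b.replace("&&", chr(0x2227))
--         b = b.replace("<->", chr(0x21D4))
--         b = b.replace("->", chr(0x21D2))
--         b = b.replace("~", chr(0x00AC))
--
--         arr_new.append(b)
--     return arr_new
-- ===== SOURCE B (Python) =====
-- _TABLE = [("forall", "\u2200"), ("exists", "\u2203"), ("||", "\u2228"),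
--           ("&&", "\u2227"), ("<->", "\u21D4"), ("->", "\u21D2"), ("~", "\u00AC")]
--
-- def unicodify(arr):
--     res = []
--     for a in arr:
--         out = []
--         i = 0
--         n = len(a)
--         while i < n:
--             for tok, sym in _TABLE:
--                 if a.startswith(tok, i):
--                     out.append(sym)
--                     i += len(tok)
--                     break
--             else:
--                 out.append(a[i])
--                 i += 1
--         res.append("".join(out))
--     return res
-- ===== Notes on version B (the rewrite author's own statement) =====
-- stated objective: alternative
-- what changed: Replaces A's seven chained full-string .replace passes (seven traversals and six intermediate strings per element) by a single left-to-right longest-match scan per element driven by an ordered (token, symbol) table with '<->' tried before '->'.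
import Mathlib
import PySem

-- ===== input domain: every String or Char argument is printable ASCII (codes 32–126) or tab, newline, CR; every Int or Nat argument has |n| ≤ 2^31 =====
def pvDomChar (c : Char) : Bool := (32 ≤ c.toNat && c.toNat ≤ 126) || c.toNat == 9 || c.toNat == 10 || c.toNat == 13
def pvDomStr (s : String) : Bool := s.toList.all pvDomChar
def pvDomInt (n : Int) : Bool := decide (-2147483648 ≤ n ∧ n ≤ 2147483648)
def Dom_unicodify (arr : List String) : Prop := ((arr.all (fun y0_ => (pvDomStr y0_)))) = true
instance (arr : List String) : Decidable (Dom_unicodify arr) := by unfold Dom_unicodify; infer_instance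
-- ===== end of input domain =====

-- B replaces A's seven chained full-string .replace passes by one left-to-right longest-match
-- scan per element driven by an ordered token table (objective: alternative decomposition).

-- ===== PORT A =====
-- literal transliteration of Source A: seven chained str.replace calls per element, appended to arr_new
def unicodify (arr : List String) : List String :=
  arr.foldl (fun arr_new a =>
    let b := PySem.Str.replace a "forall" "\u2200"
    let b := PySem.Str.replace b "exists" "\u2203"
    let b := PySem.Str.replace b "||" "\u2228"
    let b := PySem.Str.replace b "&&" "\u2227"
    let b := PySem.Str.replace b "<->" "\u21D4"
    let b := PySem.Str.replace b "->" "\u21D2"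
    let b := PySem.Str.replace b "~" "\u00AC"
    arr_new ++ [b]) []

-- ===== PORT B =====
-- transliteration of Source B's inner while-loop: at each position try the table's tokens in order
-- (the for/else over the fixed 7-entry table is unrolled into this if-cascade), on a match emit
-- the symbol and advance past the token, otherwise emit the character and advance by one
def pvScan : List Char → List Char
  | [] => []
  | c :: t =>
    if ['f','o','r','a','l','l'] <+: (c :: t) then '\u2200' :: pvScan (t.drop 5)
    else if ['e','x','i','s','t','s'] <+: (c :: t) then '\u2203' :: pvScan (t.drop 5)
    else if ['|','|'] <+: (c :: t) then '\u2228' :: pvScan (t.drop 1)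
    else if ['&','&'] <+: (c :: t) then '\u2227' :: pvScan (t.drop 1)
    else if ['<','-','>'] <+: (c :: t) then '\u21D4' :: pvScan (t.drop 2)
    else if ['-','>'] <+: (c :: t) then '\u21D2' :: pvScan (t.drop 1)
    else if ['~'] <+: (c :: t) then '\u00AC' :: pvScan t
    else c :: pvScan t
  termination_by l => l.length
  decreasing_by all_goals (simp only [List.length_cons, List.length_drop]; omega)

def unicodify_alt (arr : List String) : List String :=
  arr.foldl (fun res a => res ++ [String.ofList (pvScan a.toList)]) []

-- ===== PRECONDITION & SPEC =====
def Spec_unicodify (arr : List String) (out : List String) : Prop := out = unicodify_alt arr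
instance (arr : List String) (out : List String) : Decidable (Spec_unicodify arr out) := by unfold Spec_unicodify; infer_instance

-- ===== CLAIM (what is proved, stated in full; the proofs are below) =====
def Claim_equal_unicodify : Prop := ∀ (arr : List String), Dom_unicodify arr → Spec_unicodify arr (unicodify arr)

-- ===== LEMMAS AND PROOFS =====

-- recursive characterisation of PySem.Chars.replace (for a nonempty pattern, singleton-or-any new)
def pvRep (old nw : List Char) : List Char → List Char
  | [] => []
  | c :: t =>
    if old <+: (c :: t) then nw ++ pvRep old nw (t.drop (old.length - 1))
    else c :: pvRep old nw t
  termination_by l => l.length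
  decreasing_by all_goals (simp only [List.length_cons, List.length_drop]; omega)

theorem pvGo_eq (a : Char) (o' nw : List Char) :
    ∀ (fuel : Nat) (l acc : List Char), l.length ≤ fuel →
      PySem.Chars.replace.go (a :: o') nw fuel l acc = acc.reverse ++ pvRep (a :: o') nw l := by
  intro fuel
  induction fuel with
  | zero =>
    intro l acc h
    have hl : l = [] := by cases l <;> simp_all
    subst hl
    simp [PySem.Chars.replace.go, pvRep]
  | succ n ih =>
    intro l acc h
    cases l with
    | nil => simp [PySem.Chars.replace.go, pvRep]
    | cons c t =>
      rw [PySem.Chars.replace.go]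
      by_cases hp : (a :: o') <+: (c :: t)
      · have hb : (a :: o').isPrefixOf (c :: t) = true := List.isPrefixOf_iff_prefix.mpr hp
        rw [if_pos hb]
        have hdrop : List.drop (a :: o').length (c :: t) = t.drop o'.length := by simp
        rw [hdrop, ih _ _ (by simp only [List.length_cons] at h; simp only [List.length_drop]; omega)]
        rw [pvRep, if_pos hp]
        simp
      · have hb : (a :: o').isPrefixOf (c :: t) = false := by
          cases hpre : (a :: o').isPrefixOf (c :: t)
          · rfl
          · exact absurd (List.isPrefixOf_iff_prefix.mp hpre) hp
        rw [if_neg (by simp [hb])]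
        rw [ih _ _ (by simp only [List.length_cons] at h; omega)]
        rw [pvRep, if_neg hp]
        simp

theorem pvReplace_eq (a : Char) (o' nw cs : List Char) :
    PySem.Chars.replace cs (a :: o') nw = pvRep (a :: o') nw cs := by
  rw [PySem.Chars.replace, if_neg (by simp)]
  rw [pvGo_eq a o' nw cs.length cs [] (le_refl _)]
  simp

-- skipping: no match at the head
theorem pvRep_skip {old : List Char} (nw : List Char) {c : Char} {u : List Char}
    (h : ¬ old <+: (c :: u)) : pvRep old nw (c :: u) = c :: pvRep old nw u := by
  rw [pvRep, if_neg h]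

theorem pvRep_skip_head (a : Char) (o' nw : List Char) (c : Char) (u : List Char)
    (h : ¬ c = a) : pvRep (a :: o') nw (c :: u) = c :: pvRep (a :: o') nw u := by
  apply pvRep_skip
  simp [List.cons_prefix_cons]
  intro hc
  exact absurd hc.symm h

-- matching: the pattern sits at the head
theorem pvRep_match (a : Char) (o' nw u : List Char) :
    pvRep (a :: o') nw ((a :: o') ++ u) = nw ++ pvRep (a :: o') nw u := by
  rw [show (a :: o') ++ u = a :: (o' ++ u) from rfl, pvRep,
      if_pos (show (a :: o') <+: a :: (o' ++ u) from List.prefix_append _ _)]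
  have : (o' ++ u).drop ((a :: o').length - 1) = u := by
    simp
  rw [this]

-- a replacement pass with a one-char replacement ν preserves "starts with p" for any p that
-- contains neither the pattern's first character nor ν
theorem pvRep_prefix_iff (a ν : Char) (o' : List Char) :
    ∀ (p t : List Char), a ∉ p → ν ∉ p →
      ((p <+: pvRep (a :: o') [ν] t) ↔ (p <+: t)) := by
  intro p
  induction p with
  | nil => intro t _ _; simp
  | cons b p' ihp =>
    intro t ha hν
    cases t with
    | nil => simp [pvRep]
    | cons c t' =>
      by_cases hp : (a :: o') <+: (c :: t')
      · rw [pvRep, if_pos hp]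
        have hca : c = a := (List.cons_prefix_cons.mp hp).1.symm
        constructor
        · intro hx
          have : b = ν := (List.cons_prefix_cons.mp hx).1
          exact absurd (this ▸ List.mem_cons_self) hν
        · intro hx
          have : b = c := (List.cons_prefix_cons.mp hx).1
          exact absurd ((this.trans hca) ▸ List.mem_cons_self) ha
      · rw [pvRep, if_neg hp]
        rw [List.cons_prefix_cons, List.cons_prefix_cons]
        constructor
        · rintro ⟨hbc, hx⟩
          exact ⟨hbc, (ihp t' (fun h => ha (List.mem_cons_of_mem _ h))
            (fun h => hν (List.mem_cons_of_mem _ h))).mp hx⟩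
        · rintro ⟨hbc, hx⟩
          exact ⟨hbc, (ihp t' (fun h => ha (List.mem_cons_of_mem _ h))
            (fun h => hν (List.mem_cons_of_mem _ h))).mpr hx⟩

-- the full seven-pass chain of A, on the char-list side
def pvChain (cs : List Char) : List Char :=
  pvRep ['~'] ['\u00AC']
    (pvRep ['-','>'] ['\u21D2']
      (pvRep ['<','-','>'] ['\u21D4']
        (pvRep ['&','&'] ['\u2227']
          (pvRep ['|','|'] ['\u2228']
            (pvRep ['e','x','i','s','t','s'] ['\u2203']
              (pvRep ['f','o','r','a','l','l'] ['\u2200'] cs))))))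

-- per-token cons-shaped match lemmas (so rewriting fires on literal cons lists)
theorem pvRep_matchF (u : List Char) :
    pvRep ['f','o','r','a','l','l'] ['\u2200'] ('f'::'o'::'r'::'a'::'l'::'l'::u)
      = '\u2200' :: pvRep ['f','o','r','a','l','l'] ['\u2200'] u :=
  pvRep_match 'f' ['o','r','a','l','l'] ['\u2200'] u

theorem pvRep_matchE (u : List Char) :
    pvRep ['e','x','i','s','t','s'] ['\u2203'] ('e'::'x'::'i'::'s'::'t'::'s'::u)
      = '\u2203' :: pvRep ['e','x','i','s','t','s'] ['\u2203'] u :=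
  pvRep_match 'e' ['x','i','s','t','s'] ['\u2203'] u

theorem pvRep_matchO (u : List Char) :
    pvRep ['|','|'] ['\u2228'] ('|'::'|'::u) = '\u2228' :: pvRep ['|','|'] ['\u2228'] u :=
  pvRep_match '|' ['|'] ['\u2228'] u

theorem pvRep_matchA (u : List Char) :
    pvRep ['&','&'] ['\u2227'] ('&'::'&'::u) = '\u2227' :: pvRep ['&','&'] ['\u2227'] u :=
  pvRep_match '&' ['&'] ['\u2227'] u

theorem pvRep_matchI (u : List Char) :
    pvRep ['<','-','>'] ['\u21D4'] ('<'::'-'::'>'::u) = '\u21D4' :: pvRep ['<','-','>'] ['\u21D4'] u :=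
  pvRep_match '<' ['-','>'] ['\u21D4'] u

theorem pvRep_matchR (u : List Char) :
    pvRep ['-','>'] ['\u21D2'] ('-'::'>'::u) = '\u21D2' :: pvRep ['-','>'] ['\u21D2'] u :=
  pvRep_match '-' ['>'] ['\u21D2'] u

theorem pvRep_matchN (u : List Char) :
    pvRep ['~'] ['\u00AC'] ('~'::u) = '\u00AC' :: pvRep ['~'] ['\u00AC'] u :=
  pvRep_match '~' [] ['\u00AC'] u

-- the heart of the file: A's chained replaces compute exactly B's single longest-match scan
theorem pvChain_eq_pvScan : ∀ (n : Nat) (cs : List Char), cs.length ≤ n → pvChain cs = pvScan cs := by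
  intro n
  induction n with
  | zero =>
    intro cs h
    have : cs = [] := by cases cs <;> simp_all
    subst this
    simp [pvChain, pvRep, pvScan]
  | succ n ih =>
    intro cs hlen
    cases cs with
    | nil => simp [pvChain, pvRep, pvScan]
    | cons c t =>
      by_cases h1 : ['f','o','r','a','l','l'] <+: (c :: t)
      · obtain ⟨u, hu⟩ := h1
        rw [← hu] at hlen ⊢
        have hu' : u.length ≤ n := by simp at hlen; omega
        show pvChain ('f'::'o'::'r'::'a'::'l'::'l'::u) = pvScan ('f'::'o'::'r'::'a'::'l'::'l'::u)
        rw [show pvScan ('f'::'o'::'r'::'a'::'l'::'l'::u) = '\u2200' :: pvScan u by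
          rw [pvScan, if_pos (show ['f','o','r','a','l','l'] <+: 'f'::'o'::'r'::'a'::'l'::'l'::u from List.prefix_append _ _)]; simp]
        rw [← ih u hu']
        simp only [pvChain, pvRep_matchF]
        rw [pvRep_skip_head 'e' _ _ _ _ (by simp), pvRep_skip_head '|' _ _ _ _ (by simp),
            pvRep_skip_head '&' _ _ _ _ (by simp), pvRep_skip_head '<' _ _ _ _ (by simp),
            pvRep_skip_head '-' _ _ _ _ (by simp), pvRep_skip_head '~' _ _ _ _ (by simp)]
      by_cases h2 : ['e','x','i','s','t','s'] <+: (c :: t)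
      · obtain ⟨u, hu⟩ := h2
        rw [← hu] at hlen ⊢
        have hu' : u.length ≤ n := by simp at hlen; omega
        show pvChain ('e'::'x'::'i'::'s'::'t'::'s'::u) = pvScan ('e'::'x'::'i'::'s'::'t'::'s'::u)
        rw [show pvScan ('e'::'x'::'i'::'s'::'t'::'s'::u) = '\u2203' :: pvScan u by
          rw [pvScan, if_neg (by simp [List.cons_prefix_cons]),
              if_pos (show ['e','x','i','s','t','s'] <+: 'e'::'x'::'i'::'s'::'t'::'s'::u from List.prefix_append _ _)]; simp]
        rw [← ih u hu']
        simp only [pvChain]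
        rw [pvRep_skip_head 'f' _ _ _ _ (by simp), pvRep_skip_head 'f' _ _ _ _ (by simp),
            pvRep_skip_head 'f' _ _ _ _ (by simp), pvRep_skip_head 'f' _ _ _ _ (by simp),
            pvRep_skip_head 'f' _ _ _ _ (by simp), pvRep_skip_head 'f' _ _ _ _ (by simp),
            pvRep_matchE]
        rw [pvRep_skip_head '|' _ _ _ _ (by simp), pvRep_skip_head '&' _ _ _ _ (by simp),
            pvRep_skip_head '<' _ _ _ _ (by simp), pvRep_skip_head '-' _ _ _ _ (by simp),
            pvRep_skip_head '~' _ _ _ _ (by simp)]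
      by_cases h3 : ['|','|'] <+: (c :: t)
      · obtain ⟨u, hu⟩ := h3
        rw [← hu] at hlen ⊢
        have hu' : u.length ≤ n := by simp at hlen; omega
        show pvChain ('|'::'|'::u) = pvScan ('|'::'|'::u)
        rw [show pvScan ('|'::'|'::u) = '\u2228' :: pvScan u by
          rw [pvScan, if_neg (by simp [List.cons_prefix_cons]),
              if_neg (by simp [List.cons_prefix_cons]), if_pos (show ['|','|'] <+: '|'::'|'::u from List.prefix_append _ _)]; simp]
        rw [← ih u hu']
        simp only [pvChain]
        rw [pvRep_skip_head 'f' _ _ _ _ (by simp), pvRep_skip_head 'f' _ _ _ _ (by simp),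
            pvRep_skip_head 'e' _ _ _ _ (by simp), pvRep_skip_head 'e' _ _ _ _ (by simp),
            pvRep_matchO]
        rw [pvRep_skip_head '&' _ _ _ _ (by simp), pvRep_skip_head '<' _ _ _ _ (by simp),
            pvRep_skip_head '-' _ _ _ _ (by simp), pvRep_skip_head '~' _ _ _ _ (by simp)]
      by_cases h4 : ['&','&'] <+: (c :: t)
      · obtain ⟨u, hu⟩ := h4
        rw [← hu] at hlen ⊢
        have hu' : u.length ≤ n := by simp at hlen; omega
        show pvChain ('&'::'&'::u) = pvScan ('&'::'&'::u)
        rw [show pvScan ('&'::'&'::u) = '\u2227' :: pvScan u by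
          rw [pvScan, if_neg (by simp [List.cons_prefix_cons]),
              if_neg (by simp [List.cons_prefix_cons]),
              if_neg (by simp [List.cons_prefix_cons]), if_pos (show ['&','&'] <+: '&'::'&'::u from List.prefix_append _ _)]; simp]
        rw [← ih u hu']
        simp only [pvChain]
        rw [pvRep_skip_head 'f' _ _ _ _ (by simp), pvRep_skip_head 'f' _ _ _ _ (by simp),
            pvRep_skip_head 'e' _ _ _ _ (by simp), pvRep_skip_head 'e' _ _ _ _ (by simp),
            pvRep_skip_head '|' _ _ _ _ (by simp), pvRep_skip_head '|' _ _ _ _ (by simp),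
            pvRep_matchA]
        rw [pvRep_skip_head '<' _ _ _ _ (by simp), pvRep_skip_head '-' _ _ _ _ (by simp),
            pvRep_skip_head '~' _ _ _ _ (by simp)]
      by_cases h5 : ['<','-','>'] <+: (c :: t)
      · obtain ⟨u, hu⟩ := h5
        rw [← hu] at hlen ⊢
        have hu' : u.length ≤ n := by simp at hlen; omega
        show pvChain ('<'::'-'::'>'::u) = pvScan ('<'::'-'::'>'::u)
        rw [show pvScan ('<'::'-'::'>'::u) = '\u21D4' :: pvScan u by
          rw [pvScan, if_neg (by simp [List.cons_prefix_cons]),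
              if_neg (by simp [List.cons_prefix_cons]),
              if_neg (by simp [List.cons_prefix_cons]),
              if_neg (by simp [List.cons_prefix_cons]), if_pos (show ['<','-','>'] <+: '<'::'-'::'>'::u from List.prefix_append _ _)]; simp]
        rw [← ih u hu']
        simp only [pvChain]
        rw [pvRep_skip_head 'f' _ _ _ _ (by simp), pvRep_skip_head 'f' _ _ _ _ (by simp),
            pvRep_skip_head 'f' _ _ _ _ (by simp), pvRep_skip_head 'e' _ _ _ _ (by simp),
            pvRep_skip_head 'e' _ _ _ _ (by simp), pvRep_skip_head 'e' _ _ _ _ (by simp),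
            pvRep_skip_head '|' _ _ _ _ (by simp), pvRep_skip_head '|' _ _ _ _ (by simp),
            pvRep_skip_head '|' _ _ _ _ (by simp), pvRep_skip_head '&' _ _ _ _ (by simp),
            pvRep_skip_head '&' _ _ _ _ (by simp), pvRep_skip_head '&' _ _ _ _ (by simp),
            pvRep_matchI]
        rw [pvRep_skip_head '-' _ _ _ _ (by simp), pvRep_skip_head '~' _ _ _ _ (by simp)]
      by_cases h6 : ['-','>'] <+: (c :: t)
      · obtain ⟨u, hu⟩ := h6
        rw [← hu] at hlen ⊢
        have hu' : u.length ≤ n := by simp at hlen; omega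
        show pvChain ('-'::'>'::u) = pvScan ('-'::'>'::u)
        rw [show pvScan ('-'::'>'::u) = '\u21D2' :: pvScan u by
          rw [pvScan, if_neg (by simp [List.cons_prefix_cons]),
              if_neg (by simp [List.cons_prefix_cons]),
              if_neg (by simp [List.cons_prefix_cons]),
              if_neg (by simp [List.cons_prefix_cons]),
              if_neg (by simp [List.cons_prefix_cons]), if_pos (show ['-','>'] <+: '-'::'>'::u from List.prefix_append _ _)]; simp]
        rw [← ih u hu']
        simp only [pvChain]
        rw [pvRep_skip_head 'f' _ _ _ _ (by simp), pvRep_skip_head 'f' _ _ _ _ (by simp),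
            pvRep_skip_head 'e' _ _ _ _ (by simp), pvRep_skip_head 'e' _ _ _ _ (by simp),
            pvRep_skip_head '|' _ _ _ _ (by simp), pvRep_skip_head '|' _ _ _ _ (by simp),
            pvRep_skip_head '&' _ _ _ _ (by simp), pvRep_skip_head '&' _ _ _ _ (by simp),
            pvRep_skip_head '<' _ _ _ _ (by simp), pvRep_skip_head '<' _ _ _ _ (by simp),
            pvRep_matchR]
        rw [pvRep_skip_head '~' _ _ _ _ (by simp)]
      by_cases h7 : ['~'] <+: (c :: t)
      · obtain ⟨u, hu⟩ := h7
        rw [← hu] at hlen ⊢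
        have hu' : u.length ≤ n := by simp at hlen; omega
        show pvChain ('~'::u) = pvScan ('~'::u)
        rw [show pvScan ('~'::u) = '\u00AC' :: pvScan u by
          rw [pvScan, if_neg (by simp [List.cons_prefix_cons]),
              if_neg (by simp [List.cons_prefix_cons]),
              if_neg (by simp [List.cons_prefix_cons]),
              if_neg (by simp [List.cons_prefix_cons]),
              if_neg (by simp [List.cons_prefix_cons]),
              if_neg (by simp [List.cons_prefix_cons]), if_pos (show ['~'] <+: '~'::u from List.prefix_append _ _)]]
        rw [← ih u hu']
        simp only [pvChain]
        rw [pvRep_skip_head 'f' _ _ _ _ (by simp), pvRep_skip_head 'e' _ _ _ _ (by simp),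
            pvRep_skip_head '|' _ _ _ _ (by simp), pvRep_skip_head '&' _ _ _ _ (by simp),
            pvRep_skip_head '<' _ _ _ _ (by simp), pvRep_skip_head '-' _ _ _ _ (by simp),
            pvRep_matchN]
      -- default: no token matches at this position; every pass skips the head character
      · have ht : t.length ≤ n := by simp at hlen; omega
        have e1 : pvRep ['f','o','r','a','l','l'] ['\u2200'] (c :: t)
            = c :: pvRep ['f','o','r','a','l','l'] ['\u2200'] t := pvRep_skip _ h1
        have e2 : pvRep ['e','x','i','s','t','s'] ['\u2203']
              (c :: pvRep ['f','o','r','a','l','l'] ['\u2200'] t)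
            = c :: pvRep ['e','x','i','s','t','s'] ['\u2203']
                (pvRep ['f','o','r','a','l','l'] ['\u2200'] t) := by
          apply pvRep_skip
          intro hp
          apply h2
          obtain ⟨hc, hx⟩ := List.cons_prefix_cons.mp hp
          exact List.cons_prefix_cons.mpr
            ⟨hc, (pvRep_prefix_iff 'f' '\u2200' _ _ _ (by simp) (by simp)).mp hx⟩
        have e3 : pvRep ['|','|'] ['\u2228']
              (c :: pvRep ['e','x','i','s','t','s'] ['\u2203']
                (pvRep ['f','o','r','a','l','l'] ['\u2200'] t))
            = c :: pvRep ['|','|'] ['\u2228']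
                (pvRep ['e','x','i','s','t','s'] ['\u2203']
                  (pvRep ['f','o','r','a','l','l'] ['\u2200'] t)) := by
          apply pvRep_skip
          intro hp
          apply h3
          obtain ⟨hc, hx⟩ := List.cons_prefix_cons.mp hp
          exact List.cons_prefix_cons.mpr
            ⟨hc, (pvRep_prefix_iff 'f' '\u2200' _ _ _ (by simp) (by simp)).mp
              ((pvRep_prefix_iff 'e' '\u2203' _ _ _ (by simp) (by simp)).mp hx)⟩
        have e4 : pvRep ['&','&'] ['\u2227']
              (c :: pvRep ['|','|'] ['\u2228']
                (pvRep ['e','x','i','s','t','s'] ['\u2203']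
                  (pvRep ['f','o','r','a','l','l'] ['\u2200'] t)))
            = c :: pvRep ['&','&'] ['\u2227']
                (pvRep ['|','|'] ['\u2228']
                  (pvRep ['e','x','i','s','t','s'] ['\u2203']
                    (pvRep ['f','o','r','a','l','l'] ['\u2200'] t))) := by
          apply pvRep_skip
          intro hp
          apply h4
          obtain ⟨hc, hx⟩ := List.cons_prefix_cons.mp hp
          exact List.cons_prefix_cons.mpr
            ⟨hc, (pvRep_prefix_iff 'f' '\u2200' _ _ _ (by simp) (by simp)).mp
              ((pvRep_prefix_iff 'e' '\u2203' _ _ _ (by simp) (by simp)).mp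
                ((pvRep_prefix_iff '|' '\u2228' _ _ _ (by simp) (by simp)).mp hx))⟩
        have e5 : pvRep ['<','-','>'] ['\u21D4']
              (c :: pvRep ['&','&'] ['\u2227']
                (pvRep ['|','|'] ['\u2228']
                  (pvRep ['e','x','i','s','t','s'] ['\u2203']
                    (pvRep ['f','o','r','a','l','l'] ['\u2200'] t))))
            = c :: pvRep ['<','-','>'] ['\u21D4']
                (pvRep ['&','&'] ['\u2227']
                  (pvRep ['|','|'] ['\u2228']
                    (pvRep ['e','x','i','s','t','s'] ['\u2203']
                      (pvRep ['f','o','r','a','l','l'] ['\u2200'] t)))) := by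
          apply pvRep_skip
          intro hp
          apply h5
          obtain ⟨hc, hx⟩ := List.cons_prefix_cons.mp hp
          exact List.cons_prefix_cons.mpr
            ⟨hc, (pvRep_prefix_iff 'f' '\u2200' _ _ _ (by simp) (by simp)).mp
              ((pvRep_prefix_iff 'e' '\u2203' _ _ _ (by simp) (by simp)).mp
                ((pvRep_prefix_iff '|' '\u2228' _ _ _ (by simp) (by simp)).mp
                  ((pvRep_prefix_iff '&' '\u2227' _ _ _ (by simp) (by simp)).mp hx)))⟩
        have e6 : pvRep ['-','>'] ['\u21D2']
              (c :: pvRep ['<','-','>'] ['\u21D4']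
                (pvRep ['&','&'] ['\u2227']
                  (pvRep ['|','|'] ['\u2228']
                    (pvRep ['e','x','i','s','t','s'] ['\u2203']
                      (pvRep ['f','o','r','a','l','l'] ['\u2200'] t)))))
            = c :: pvRep ['-','>'] ['\u21D2']
                (pvRep ['<','-','>'] ['\u21D4']
                  (pvRep ['&','&'] ['\u2227']
                    (pvRep ['|','|'] ['\u2228']
                      (pvRep ['e','x','i','s','t','s'] ['\u2203']
                        (pvRep ['f','o','r','a','l','l'] ['\u2200'] t))))) := by
          apply pvRep_skip
          intro hp
          apply h6
          obtain ⟨hc, hx⟩ := List.cons_prefix_cons.mp hp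
          exact List.cons_prefix_cons.mpr
            ⟨hc, (pvRep_prefix_iff 'f' '\u2200' _ _ _ (by simp) (by simp)).mp
              ((pvRep_prefix_iff 'e' '\u2203' _ _ _ (by simp) (by simp)).mp
                ((pvRep_prefix_iff '|' '\u2228' _ _ _ (by simp) (by simp)).mp
                  ((pvRep_prefix_iff '&' '\u2227' _ _ _ (by simp) (by simp)).mp
                    ((pvRep_prefix_iff '<' '\u21D4' _ _ _ (by simp) (by simp)).mp hx))))⟩
        have e7 : pvRep ['~'] ['\u00AC']
              (c :: pvRep ['-','>'] ['\u21D2']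
                (pvRep ['<','-','>'] ['\u21D4']
                  (pvRep ['&','&'] ['\u2227']
                    (pvRep ['|','|'] ['\u2228']
                      (pvRep ['e','x','i','s','t','s'] ['\u2203']
                        (pvRep ['f','o','r','a','l','l'] ['\u2200'] t))))))
            = c :: pvRep ['~'] ['\u00AC']
                (pvRep ['-','>'] ['\u21D2']
                  (pvRep ['<','-','>'] ['\u21D4']
                    (pvRep ['&','&'] ['\u2227']
                      (pvRep ['|','|'] ['\u2228']
                        (pvRep ['e','x','i','s','t','s'] ['\u2203']
                          (pvRep ['f','o','r','a','l','l'] ['\u2200'] t)))))) := by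
          apply pvRep_skip
          intro hp
          apply h7
          obtain ⟨hc, _⟩ := List.cons_prefix_cons.mp hp
          exact List.cons_prefix_cons.mpr ⟨hc, List.nil_prefix⟩
        rw [show pvScan (c :: t) = c :: pvScan t by
          rw [pvScan, if_neg h1, if_neg h2, if_neg h3, if_neg h4, if_neg h5, if_neg h6,
              if_neg h7]]
        rw [← ih t ht]
        simp only [pvChain]
        rw [e1, e2, e3, e4, e5, e6, e7]

-- per-element: A's chained Str.replace equals B's scanned string
theorem pvElem_eq (a : String) :
    PySem.Str.replace (PySem.Str.replace (PySem.Str.replace (PySem.Str.replace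
      (PySem.Str.replace (PySem.Str.replace (PySem.Str.replace a "forall" "\u2200")
        "exists" "\u2203") "||" "\u2228") "&&" "\u2227") "<->" "\u21D4") "->" "\u21D2")
      "~" "\u00AC"
    = String.ofList (pvScan a.toList) := by
  have h : ∀ (s : String) (o n : String), PySem.Str.replace s o n
      = String.ofList (PySem.Chars.replace s.toList o.toList n.toList) := fun _ _ _ => rfl
  simp only [h, String.toList_ofList]
  rw [show ("forall".toList) = ['f','o','r','a','l','l'] from rfl,
      show ("exists".toList) = ['e','x','i','s','t','s'] from rfl,
      show ("||".toList) = ['|','|'] from rfl,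
      show ("&&".toList) = ['&','&'] from rfl,
      show ("<->".toList) = ['<','-','>'] from rfl,
      show ("->".toList) = ['-','>'] from rfl,
      show ("~".toList) = ['~'] from rfl]
  simp only [pvReplace_eq]
  rw [show ("\u2200".toList) = ['\u2200'] from rfl, show ("\u2203".toList) = ['\u2203'] from rfl,
      show ("\u2228".toList) = ['\u2228'] from rfl, show ("\u2227".toList) = ['\u2227'] from rfl,
      show ("\u21D4".toList) = ['\u21D4'] from rfl, show ("\u21D2".toList) = ['\u21D2'] from rfl,
      show ("\u00AC".toList) = ['\u00AC'] from rfl]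
  rw [show pvRep ['~'] ['\u00AC'] (pvRep ['-','>'] ['\u21D2'] (pvRep ['<','-','>'] ['\u21D4']
        (pvRep ['&','&'] ['\u2227'] (pvRep ['|','|'] ['\u2228']
          (pvRep ['e','x','i','s','t','s'] ['\u2203']
            (pvRep ['f','o','r','a','l','l'] ['\u2200'] a.toList))))))
      = pvChain a.toList from rfl]
  rw [pvChain_eq_pvScan a.toList.length a.toList (le_refl _)]

-- ===== VERDICT (by name: the statement is the Claim_ definition above) =====
theorem unicodify_spec : Claim_equal_unicodify := by
  unfold Claim_equal_unicodify
  intro arr _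
  unfold Spec_unicodify unicodify unicodify_alt
  rw [PySem.List.foldl_append_singleton_eq_map, PySem.List.foldl_append_singleton_eq_map]
  simp only [List.nil_append]
  exact List.map_congr_left (fun a _ => pvElem_eq a)
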